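-- pv_equiv track=rewrite | github.com/PosoSAgapo/GMB_corpus_ner | models_func.py | form_standard_list
-- ===== SOURCE A (Python) =====
-- def form_standard_list(lable_list,train_data):
--     reformed_list=[]
--     flag=0
--     for sentence,sentence_num in zip(train_data,range(len(train_data))):
--         reformed_list.append([])
--         reformed_list[sentence_num].extend(lable_list[flag:flag+len(sentence)])
--         flag=flag+len(sentence)
--     return reformed_list
-- ===== SOURCE B (Python) =====
-- def form_standard_list(lable_list, train_data):
--     offsets = [0]
--     for sentence in train_data:
--         offsets.append(offsets[-1] + len(sentence))
--     return [lable_list[offsets[i]:offsets[i + 1]] for i in range(len(train_data))]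
-- ===== Notes on version B (the rewrite author's own statement) =====
-- stated objective: alternative
-- what changed: Replaces A's running flag accumulator building chunks inside one loop with a precomputed prefix-offset table followed by a slicing comprehension over sentence indices.
import Mathlib
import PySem

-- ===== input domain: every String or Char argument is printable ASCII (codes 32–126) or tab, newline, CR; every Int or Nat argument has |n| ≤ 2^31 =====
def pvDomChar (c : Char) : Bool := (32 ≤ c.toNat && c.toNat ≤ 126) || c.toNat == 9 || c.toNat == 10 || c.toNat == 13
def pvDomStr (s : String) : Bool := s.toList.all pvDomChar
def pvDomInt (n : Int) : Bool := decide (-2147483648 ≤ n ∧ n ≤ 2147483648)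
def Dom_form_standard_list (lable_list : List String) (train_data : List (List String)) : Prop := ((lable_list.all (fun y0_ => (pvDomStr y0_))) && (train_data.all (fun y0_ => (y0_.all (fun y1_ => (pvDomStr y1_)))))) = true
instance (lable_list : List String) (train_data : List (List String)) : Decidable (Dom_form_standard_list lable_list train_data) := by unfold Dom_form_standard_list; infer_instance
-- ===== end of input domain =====

-- B precomputes a prefix-offset table and slices by index instead of A's running flag;
-- same O(n) cost, different decomposition (objective: alternative).

-- ===== PORT A =====
-- one loop: append an empty sublist, extend it with lable_list[flag:flag+len(sentence)], advance flag
def form_standard_list (lable_list : List String) (train_data : List (List String)) : List (List String) :=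
  (train_data.foldl
    (fun (st : List (List String) × Int) sentence =>
      (st.1 ++ [PySem.List.slice lable_list (some st.2) (some (st.2 + (sentence.length : Int)))],
       st.2 + (sentence.length : Int)))
    ([], 0)).1

-- ===== PORT B =====
-- offsets[-1] is ported with pyGetD (exact here: offsets is never empty),
-- offsets[i] with pyGetD (exact here: i and i+1 are always in range)
def form_standard_list_alt (lable_list : List String) (train_data : List (List String)) : List (List String) :=
  let offsets : List Int :=
    train_data.foldl (fun acc sentence => acc ++ [PySem.List.pyGetD acc (-1) 0 + (sentence.length : Int)]) [0]
  (List.range train_data.length).map (fun (i : Nat) =>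
    PySem.List.slice lable_list (some (PySem.List.pyGetD offsets ((i : Int)) 0))
      (some (PySem.List.pyGetD offsets ((i : Int) + 1) 0)))

-- ===== PRECONDITION & SPEC =====
def Spec_form_standard_list (lable_list : List String) (train_data : List (List String)) (out : List (List String)) : Prop := out = form_standard_list_alt lable_list train_data
instance (lable_list : List String) (train_data : List (List String)) (out : List (List String)) : Decidable (Spec_form_standard_list lable_list train_data out) := by unfold Spec_form_standard_list; infer_instance

-- ===== CLAIM (what is proved, stated in full; the proofs are below) =====
def Claim_equal_form_standard_list : Prop := ∀ (lable_list : List String) (train_data : List (List String)), Dom_form_standard_list lable_list train_data → Spec_form_standard_list lable_list train_data (form_standard_list lable_list train_data)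

-- ===== LEMMAS AND PROOFS =====

-- common characterisation: chunk lable_list by the sentence lengths
def pvChunks (ls : List String) : List (List String) → List (List String)
  | [] => []
  | s :: ts => ls.take s.length :: pvChunks (ls.drop s.length) ts

-- the partial-sum offsets after a base offset m
def pvSums (m : Nat) : List (List String) → List Int
  | [] => []
  | s :: ts => ((m + s.length : Nat) : Int) :: pvSums (m + s.length) ts

theorem formA_aux (ls : List String) :
    ∀ (td : List (List String)) (acc : List (List String)) (m : Nat),
      (td.foldl
        (fun (st : List (List String) × Int) sentence =>
          (st.1 ++ [PySem.List.slice ls (some st.2) (some (st.2 + (sentence.length : Int)))],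
           st.2 + (sentence.length : Int)))
        (acc, (m : Int))).1 = acc ++ pvChunks (ls.drop m) td := by
  intro td
  induction td with
  | nil => intro acc m; simp [pvChunks]
  | cons s ts ih =>
    intro acc m
    have hcast : (m : Int) + (s.length : Int) = ((m + s.length : Nat) : Int) := by push_cast; ring
    simp only [List.foldl_cons, hcast, ih]
    rw [PySem.List.slice_natCast]
    simp [pvChunks, List.drop_drop]

theorem formB_off :
    ∀ (td : List (List String)) (acc : List Int) (m : Nat),
      acc.getLast? = some (m : Int) →
      td.foldl (fun acc sentence => acc ++ [PySem.List.pyGetD acc (-1) 0 + (sentence.length : Int)]) acc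
        = acc ++ pvSums m td := by
  intro td
  induction td with
  | nil => intro acc m _; simp [pvSums]
  | cons s ts ih =>
    intro acc m hlast
    have hne : acc ≠ [] := by intro h; simp [h] at hlast
    have hget : PySem.List.pyGetD acc (-1) 0 = (m : Int) := by
      rw [PySem.List.pyGetD_neg_one acc 0 hne]
      have h2 := List.getLast?_eq_some_getLast (l := acc) hne
      rw [h2] at hlast
      exact Option.some.inj hlast
    simp only [List.foldl_cons, hget]
    have hcast : (m : Int) + (s.length : Int) = ((m + s.length : Nat) : Int) := by push_cast; ring
    rw [hcast, ih (acc ++ [((m + s.length : Nat) : Int)]) (m + s.length) (by simp)]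
    simp [pvSums]

theorem formB_aux (ls : List String) :
    ∀ (td : List (List String)) (m : Nat),
      (List.range td.length).map (fun i =>
        PySem.List.slice ls (some (((m : Int) :: pvSums m td).getD i 0))
          (some (((m : Int) :: pvSums m td).getD (i + 1) 0)))
        = pvChunks (ls.drop m) td := by
  intro td
  induction td with
  | nil => intro m; simp [pvChunks]
  | cons s ts ih =>
    intro m
    simp only [List.length_cons, List.range_succ_eq_map, List.map_cons, List.map_map, pvChunks]
    congr 1
    · simp only [pvSums, List.getD_cons_zero, List.getD_cons_succ, Nat.zero_add]
      rw [PySem.List.slice_natCast]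
      simp
    · rw [show ((ls.drop m).drop s.length) = ls.drop (m + s.length) by
        rw [List.drop_drop]]
      rw [← ih (m + s.length)]
      apply List.map_congr_left
      intro i _
      simp only [Function.comp_apply, pvSums, List.getD_cons_succ]

theorem formB_eq (ls : List String) (td : List (List String)) :
    form_standard_list_alt ls td = pvChunks ls td := by
  unfold form_standard_list_alt
  rw [formB_off td [(0 : Int)] 0 (by simp)]
  have hB := formB_aux ls td 0
  simp only [Nat.cast_zero, List.drop_zero] at hB
  rw [← hB]
  simp only [List.singleton_append]
  apply List.map_congr_left
  intro i _
  have h1 : PySem.List.pyGetD ((0 : Int) :: pvSums 0 td) (i : Int) 0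
      = ((0 : Int) :: pvSums 0 td).getD i 0 :=
    PySem.List.pyGetD_natCast ((0 : Int) :: pvSums 0 td) i 0
  have h2 : PySem.List.pyGetD ((0 : Int) :: pvSums 0 td) ((i : Int) + 1) 0
      = ((0 : Int) :: pvSums 0 td).getD (i + 1) 0 := by
    have hc : ((i : Int) + 1) = ((i + 1 : Nat) : Int) := by push_cast; ring
    rw [hc]
    exact PySem.List.pyGetD_natCast ((0 : Int) :: pvSums 0 td) (i + 1) 0
  rw [h1, h2]

-- ===== VERDICT (by name: the statement is the Claim_ definition above) =====
theorem form_standard_list_spec : Claim_equal_form_standard_list := by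
  intro ls td _
  unfold Spec_form_standard_list
  have hA := formA_aux ls td [] 0
  simp only [Nat.cast_zero, List.drop_zero, List.nil_append] at hA
  rw [formB_eq]
  unfold form_standard_list
  exact hA
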